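-- pv_equiv track=rewrite | github.com/IanJang/codewars | hansul/phone_directory.py | phone
-- ===== SOURCE A (Python) =====
-- from copy import copy
--
-- def phone(strng, num):
--     lines = strng.split("\n")
--     target_line = [line for line in lines if line.find(num) != -1]
--     cnt = len(target_line)
--     if cnt == 0:
--         return f"Error => Not found: {num}"
--     elif cnt >= 2:
--         return f"Error => Too many people: {num}"
--
--     target_line = target_line[0]
--
--     target_line = target_line.replace("+"+num, "")
--
--     name = target_line[target_line.find("<")+1:target_line.find(">")]
--     target_line = target_line.replace("<"+name+">", "")
--
--     copy_line = copy(target_line)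
--     for word in copy_line:
--         if word != " " and word != "-" and word != "." and not word.isalpha() and not word.isdigit():
--             target_line = target_line.replace(word, " ")
--
--     address = " ".join([s.strip() for s in target_line.split(" ") if s.strip() != ""]).strip()
--
--     return f"Phone => {num}, Name => {name}, Address => {address}"
-- ===== SOURCE B (Python) =====
-- def phone(strng, num):
--     hits = [line for line in strng.split("\n") if num in line]
--     if len(hits) == 0:
--         return "Error => Not found: " + num
--     if len(hits) > 1:
--         return "Error => Too many people: " + num
--     line = hits[0].replace("+" + num, "")
--     name = line[line.find("<") + 1:line.find(">")]
--     pat = "<" + name + ">"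
--     tokens = []
--     cur = []
--     i = 0
--     while i < len(line):
--         if line.startswith(pat, i):
--             i += len(pat)
--             continue
--         c = line[i]
--         if c == "-" or c == "." or c.isalpha() or c.isdigit():
--             cur.append(c)
--         elif cur:
--             tokens.append("".join(cur))
--             cur = []
--         i += 1
--     if cur:
--         tokens.append("".join(cur))
--     return "Phone => " + num + ", Name => " + name + ", Address => " + " ".join(tokens)
-- ===== Notes on version B (the rewrite author's own statement) =====
-- stated objective: alternative
-- what changed: A rewrites the line in stages (global replace of '<name>', a per-character whole-string replace loop, then split(' ')/strip/filter/join/strip); B instead runs one left-to-right index scan over the number-stripped line that skips '<name>' occurrences by prefix match and accumulates address tokens directly, never building intermediate cleaned strings.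
import Mathlib
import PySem

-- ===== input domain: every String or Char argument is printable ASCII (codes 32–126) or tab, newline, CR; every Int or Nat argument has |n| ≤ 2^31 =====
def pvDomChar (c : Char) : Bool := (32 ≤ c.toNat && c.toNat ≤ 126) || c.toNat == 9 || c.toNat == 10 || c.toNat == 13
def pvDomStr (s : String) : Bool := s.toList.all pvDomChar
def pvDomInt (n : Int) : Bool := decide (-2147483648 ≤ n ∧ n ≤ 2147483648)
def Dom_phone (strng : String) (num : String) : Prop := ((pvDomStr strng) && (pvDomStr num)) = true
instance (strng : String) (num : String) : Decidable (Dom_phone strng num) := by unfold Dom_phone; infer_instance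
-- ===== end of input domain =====

-- B replaces A's staged string rewrites (global replace of "<name>", a per-character
-- whole-string replace loop, split(" ")/strip/filter/join/strip) by ONE left-to-right scan
-- of the number-stripped line that skips "<name>" occurrences by prefix match and
-- accumulates the address tokens directly (objective: alternative algorithm, not speed).

-- ===== PORT A =====
-- A-side helper: the bad-character test of A's loop body
def badC (w : Char) : Bool :=
  w != ' ' && w != '-' && w != '.' && !PySem.Chars.isalpha w && !PySem.Chars.isdigit w

def phone (strng : String) (num : String) : String :=
  let lines := (PySem.Str.split? strng "\n").getD []
  let targetLines := lines.filter (fun line => PySem.Str.find line num != -1)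
  let cnt := targetLines.length
  if cnt = 0 then "Error => Not found: " ++ num
  else if cnt ≥ 2 then "Error => Too many people: " ++ num
  else
    let t0 := PySem.List.pyGetD targetLines 0 ""
    let t1 := PySem.Str.replace t0 ("+" ++ num) ""
    let name := PySem.Str.slice t1 (some (PySem.Str.find t1 "<" + 1)) (some (PySem.Str.find t1 ">"))
    let t2 := PySem.Str.replace t1 ("<" ++ name ++ ">") ""
    -- for word in copy(t2): if bad(word): t2 = t2.replace(word, " ")
    let t3 := t2.toList.foldl (fun tl word =>
        if badC word then PySem.Str.replace tl (String.ofList [word]) " " else tl) t2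
    let parts := ((PySem.Str.split? t3 " ").getD []).filter (fun s => PySem.Str.strip s != "")
    let address := PySem.Str.strip (PySem.Str.join " " (parts.map PySem.Str.strip))
    "Phone => " ++ num ++ ", Name => " ++ name ++ ", Address => " ++ address

-- ===== PORT B =====
-- B-side helper: the kept-character test of B's scan ('-', '.', isalpha, isdigit)
def keepB (c : Char) : Bool := c == '-' || c == '.' || PySem.Chars.isalpha c || PySem.Chars.isdigit c

-- B's while-i loop over the line, as recursion on the remaining suffix: skip the pattern
-- '<name>' ('<' :: ps with ps = name ++ ['>']) on a prefix match, otherwise classify one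
-- character, accumulating the current token 'cur' (reversed) and emitting finished tokens.
def scanTok (p : Char) (ps : List Char) : List Char → List Char → List (List Char)
  | [], cur => if cur.isEmpty then [] else [cur.reverse]
  | c :: t, cur =>
    if (p :: ps).isPrefixOf (c :: t) then
      scanTok p ps (t.drop ps.length) cur
    else if keepB c then scanTok p ps t (c :: cur)
    else if cur.isEmpty then scanTok p ps t []
    else cur.reverse :: scanTok p ps t []
termination_by l _ => l.length
decreasing_by all_goals (simp; try omega)

def phone_alt (strng : String) (num : String) : String :=
  let hits := ((PySem.Str.split? strng "\n").getD []).filter (fun line => PySem.Str.isIn num line)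
  if hits.length = 0 then "Error => Not found: " ++ num
  else if hits.length > 1 then "Error => Too many people: " ++ num
  else
    let line := PySem.Str.replace (PySem.List.pyGetD hits 0 "") ("+" ++ num) ""
    let name := PySem.Str.slice line (some (PySem.Str.find line "<" + 1)) (some (PySem.Str.find line ">"))
    let toks := scanTok '<' (name.toList ++ ['>']) line.toList []
    "Phone => " ++ num ++ ", Name => " ++ name ++ ", Address => " ++
      PySem.Str.join " " (toks.map String.ofList)

-- ===== PRECONDITION & SPEC =====
def Spec_phone (strng : String) (num : String) (out : String) : Prop := out = phone_alt strng num
instance (strng : String) (num : String) (out : String) : Decidable (Spec_phone strng num out) := by unfold Spec_phone; infer_instance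

-- ===== CLAIM (what is proved, stated in full; the proofs are below) =====
def Claim_equal_phone : Prop := ∀ (strng : String) (num : String), Dom_phone strng num → Spec_phone strng num (phone strng num)

-- ===== LEMMAS AND PROOFS =====

-- A's single-character replace is a character map.
theorem replace_single (c : Char) (s : List Char) :
    PySem.Chars.replace s [c] [' '] = s.map (fun x => if x = c then ' ' else x) := by
  have go : ∀ (l : List Char) (fuel : Nat) (acc : List Char), l.length ≤ fuel →
      PySem.Chars.replace.go [c] [' '] fuel l acc
        = acc.reverse ++ l.map (fun x => if x = c then ' ' else x) := by
    intro l
    induction l with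
    | nil => intro fuel acc _; cases fuel <;> simp [PySem.Chars.replace.go]
    | cons a t ih =>
      intro fuel acc h
      cases fuel with
      | zero => simp at h
      | succ f =>
        simp only [PySem.Chars.replace.go]
        by_cases hac : a = c
        · subst hac
          simp [List.isPrefixOf, ih f _ (by simpa using h)]
        · simp [List.isPrefixOf, hac, Ne.symm hac, ih f _ (by simpa using h)]
  simp [PySem.Chars.replace, go s s.length [] le_rfl]

-- A's loop, moved from String state to List Char state.
theorem foldl_str (l : List Char) (s : String) :
    (l.foldl (fun tl word => if badC word then PySem.Str.replace tl (String.ofList [word]) " " else tl) s).toList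
      = l.foldl (fun tl word => if badC word then PySem.Chars.replace tl [word] [' '] else tl) s.toList := by
  induction l generalizing s with
  | nil => rfl
  | cons a t ih =>
    simp only [List.foldl_cons]
    rw [ih]
    by_cases h : badC a
    · simp [h, PySem.Str.toList_replace]
    · simp [h]

-- Folding single-character replaces over a word list is one map.
theorem foldl_map (ws : List Char) (l : List Char) :
    ws.foldl (fun tl w => if badC w then PySem.Chars.replace tl [w] [' '] else tl) l
      = l.map (fun x => if badC x && ws.contains x then ' ' else x) := by
  induction ws generalizing l with
  | nil => simp
  | cons a t ih =>
    simp only [List.foldl_cons]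
    by_cases h : badC a
    · rw [if_pos h, replace_single, ih, List.map_map]
      apply List.map_congr_left
      intro x _
      by_cases hxa : x = a
      · subst hxa; simp [show badC ' ' = false from by decide, h]
      · simp [hxa]
    · rw [if_neg h, ih]
      apply List.map_congr_left
      intro x _
      by_cases hxa : x = a
      · subst hxa; simp [h]
      · simp [hxa]

-- Pointwise: A's bad-character substitution agrees with B's kept-character classification.
theorem char_map_eq (x : Char) :
    (if badC x then ' ' else x) = (if keepB x then x else ' ') := by
  by_cases h1 : x = ' '
  · subst h1; decide
  · simp only [badC, keepB]
    by_cases h2 : x = '-' <;> by_cases h3 : x = '.' <;>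
      by_cases h4 : PySem.Chars.isalpha x <;> by_cases h5 : PySem.Chars.isdigit x <;>
      simp [h1, h2, h3, h4, h5]

-- A's whole loop result, character by character, is the kept-character map.
theorem fold_toList (t2 : String) :
    (t2.toList.foldl (fun tl word => if badC word then PySem.Str.replace tl (String.ofList [word]) " " else tl) t2).toList
      = t2.toList.map (fun c => if keepB c then c else ' ') := by
  rw [foldl_str, foldl_map]
  apply List.map_congr_left
  intro x hx
  rw [show (badC x && t2.toList.contains x) = badC x by simp [hx]]
  exact char_map_eq x

theorem keep_bounds (c : Char) (h : keepB c = true) : 45 ≤ c.toNat ∧ c.toNat ≤ 122 := by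
  simp only [keepB, PySem.Chars.isalpha, PySem.Chars.isdigit,
    PySem.Chars.isupper, PySem.Chars.islower, Bool.or_eq_true, beq_iff_eq,
    Bool.and_eq_true, decide_eq_true_eq, Char.le_def, UInt32.le_iff_toNat_le] at h
  rcases h with ((h | h) | (⟨h1, h2⟩ | ⟨h1, h2⟩)) | ⟨h1, h2⟩
  · subst h; decide
  · subst h; decide
  all_goals
    have e0 : c.toNat = c.val.toNat := rfl
    have e1 : ('A' : Char).val.toNat = 65 := rfl
    have e2 : ('Z' : Char).val.toNat = 90 := rfl
    have e3 : ('a' : Char).val.toNat = 97 := rfl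
    have e4 : ('z' : Char).val.toNat = 122 := rfl
    have e5 : ('0' : Char).val.toNat = 48 := rfl
    have e6 : ('9' : Char).val.toNat = 57 := rfl
    omega

theorem keep_not_space (c : Char) (h : keepB c = true) : PySem.Chars.isspace c = false := by
  have := keep_bounds c h
  simp [PySem.Chars.isspace]
  omega

-- Specification helpers: split on ' ' keeping empties (splitSp), maximal nonempty
-- ' '-separated pieces (tokGo), maximal runs of kept characters (tokC), and
-- Python replace(pat, "") as structural recursion (replAll).
def splitSp (l : List Char) (cur : List Char) : List (List Char) :=
  match l with
  | [] => [cur.reverse]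
  | a :: t => if a = ' ' then cur.reverse :: splitSp t [] else splitSp t (a :: cur)

def tokGo (l : List Char) (cur : List Char) : List (List Char) :=
  match l with
  | [] => if cur.isEmpty then [] else [cur.reverse]
  | a :: t =>
    if a = ' ' then (if cur.isEmpty then tokGo t [] else cur.reverse :: tokGo t [])
    else tokGo t (a :: cur)

def tokC : List Char → List Char → List (List Char)
  | [], cur => if cur.isEmpty then [] else [cur.reverse]
  | a :: t, cur =>
    if keepB a then tokC t (a :: cur)
    else if cur.isEmpty then tokC t []
    else cur.reverse :: tokC t []

def replAll (p : Char) (ps : List Char) : List Char → List Char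
  | [] => []
  | c :: t =>
    if (p :: ps).isPrefixOf (c :: t) then replAll p ps (t.drop ps.length)
    else c :: replAll p ps t
termination_by l => l.length
decreasing_by all_goals (simp; try omega)

theorem splitOn_sp (l : List Char) : PySem.Chars.splitOn l [' '] = splitSp l [] := by
  have go : ∀ (l : List Char) (fuel : Nat) (cur : List Char) (acc : List (List Char)),
      l.length ≤ fuel →
      PySem.Chars.splitOn.go [' '] fuel l cur acc = acc.reverse ++ splitSp l cur := by
    intro l
    induction l with
    | nil => intro fuel cur acc _; cases fuel <;> simp [PySem.Chars.splitOn.go, splitSp]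
    | cons a t ih =>
      intro fuel cur acc h
      cases fuel with
      | zero => simp at h
      | succ f =>
        simp only [PySem.Chars.splitOn.go]
        by_cases ha : a = ' '
        · subst ha
          simp [List.isPrefixOf, ih f _ _ (by simpa using h), splitSp]
        · simp [List.isPrefixOf, ha, Ne.symm ha, ih f _ _ (by simpa using h), splitSp]
  simp [PySem.Chars.splitOn, go l (l.length + 1) [] [] (by omega)]

-- Dropping empty pieces of the ' '-split gives exactly the tokens.
theorem filter_sp_tok (l : List Char) : ∀ cur,
    (splitSp l cur).filter (fun p => !p.isEmpty) = tokGo l cur := by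
  induction l with
  | nil => intro cur; by_cases hc : cur.isEmpty <;> simp_all [splitSp, tokGo, List.isEmpty_iff]
  | cons a t ih =>
    intro cur
    by_cases ha : a = ' '
    · subst ha
      by_cases hc : cur.isEmpty <;> simp_all [splitSp, tokGo, List.isEmpty_iff]
    · simp [splitSp, tokGo, ha, ih]

theorem mem_splitSp (l : List Char) : ∀ cur p x, p ∈ splitSp l cur → x ∈ p →
    x ∈ cur ∨ (x ∈ l ∧ x ≠ ' ') := by
  induction l with
  | nil =>
    intro cur p x hp hx
    simp [splitSp] at hp; subst hp; simp at hx; exact Or.inl hx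
  | cons a t ih =>
    intro cur p x hp hx
    by_cases ha : a = ' '
    · subst ha
      simp only [splitSp] at hp
      rcases List.mem_cons.mp hp with h | h
      · subst h; simp at hx; exact Or.inl hx
      · rcases ih [] p x h hx with h' | h'
        · simp at h'
        · exact Or.inr ⟨by simp [h'.1], h'.2⟩
    · simp only [splitSp, if_neg ha] at hp
      rcases ih _ p x hp hx with h' | h'
      · rcases List.mem_cons.mp h' with h'' | h''
        · exact Or.inr ⟨by simp [h''], by simpa [h''] using ha⟩
        · exact Or.inl h''
      · exact Or.inr ⟨by simp [h'.1], h'.2⟩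

theorem intercalate_cons (sep p : List Char) (ps : List (List Char)) :
    List.intercalate sep (p :: ps)
      = p ++ (if ps.isEmpty then [] else sep ++ List.intercalate sep ps) := by
  cases ps <;> simp [List.intercalate, List.intersperse]

theorem join_ends (ps : List (List Char))
    (h : ∀ p ∈ ps, p ≠ [] ∧ ∀ c ∈ p, PySem.Chars.isspace c = false) (hne : ps ≠ []) :
    ∃ (x : List Char) (a : Char), List.intercalate [' '] ps = x ++ [a]
      ∧ PySem.Chars.isspace a = false := by
  induction ps with
  | nil => exact absurd rfl hne
  | cons p rest ih =>
    cases rest with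
    | nil =>
      obtain ⟨hp, hsp⟩ := h p (by simp)
      obtain ⟨q, a, hqa⟩ := List.eq_nil_or_concat' p |>.resolve_left hp
      exact ⟨q, a, by simp [intercalate_cons, hqa], hsp a (by simp [hqa])⟩
    | cons r rs =>
      obtain ⟨x, a, hx, ha⟩ := ih (fun q hq => h q (by simp [hq])) (by simp)
      refine ⟨p ++ ' ' :: x, a, ?_, ha⟩
      rw [intercalate_cons]
      simp [hx]

-- Stripping a ' '-join of nonempty non-space pieces is a no-op.
theorem strip_join (ps : List (List Char))
    (h : ∀ p ∈ ps, p ≠ [] ∧ ∀ c ∈ p, PySem.Chars.isspace c = false) :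
    PySem.Chars.strip (PySem.Chars.join [' '] ps) = PySem.Chars.join [' '] ps := by
  cases hps : ps with
  | nil => simp [PySem.Chars.join, PySem.Chars.strip, PySem.Chars.lstrip, PySem.Chars.rstrip,
      List.intercalate]
  | cons p rest =>
    subst hps
    obtain ⟨hp, hsp⟩ := h p (by simp)
    obtain ⟨c, cs, hcc⟩ := List.exists_cons_of_ne_nil hp
    have hlstrip : PySem.Chars.lstrip (PySem.Chars.join [' '] (p :: rest))
        = PySem.Chars.join [' '] (p :: rest) := by
      simp only [PySem.Chars.join, PySem.Chars.lstrip, intercalate_cons, hcc]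
      simp [hsp c (by simp [hcc])]
    rw [PySem.Chars.strip, hlstrip]
    obtain ⟨x, a, hx, ha⟩ := join_ends (p :: rest) h (by simp)
    simp only [PySem.Chars.join] at *
    rw [hx, PySem.Chars.rstrip]
    simp [ha]

theorem strip_noop (p : List Char) (h : ∀ c ∈ p, PySem.Chars.isspace c = false) :
    PySem.Chars.strip p = p := by
  rcases eq_or_ne p [] with hp | hp
  · subst hp; decide
  · have := strip_join [p] (by simpa [hp] using h)
    simpa [PySem.Chars.join, List.intercalate] using this

-- Characters of pieces of the cleaned string's ' '-split are kept characters.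
theorem piece_nonspace (l : List Char) (p : List Char)
    (hp : p ∈ splitSp (l.map (fun c => if keepB c then c else ' ')) []) :
    ∀ c ∈ p, PySem.Chars.isspace c = false := by
  intro c hc
  rcases mem_splitSp _ [] p c hp hc with h | ⟨hm, hne⟩
  · simp at h
  · obtain ⟨x, _, hx⟩ := List.mem_map.mp hm
    by_cases hk : keepB x
    · rw [if_pos hk] at hx; subst hx; exact keep_not_space x hk
    · rw [if_neg hk] at hx; exact absurd hx.symm hne

-- The ' '-tokenizer of the kept-character map is the direct kept-run tokenizer.
theorem tokGo_map (l : List Char) : ∀ cur,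
    tokGo (l.map (fun c => if keepB c then c else ' ')) cur = tokC l cur := by
  induction l with
  | nil => intro cur; rfl
  | cons a t ih =>
    intro cur
    by_cases hk : keepB a
    · have hne : a ≠ ' ' := by
        intro he; subst he; have := keep_bounds _ hk; revert this; decide
      simp [tokGo, tokC, hne, ih, hk]
    · simp [tokGo, tokC, hk, ih]

-- Python's replace(pat, "") with nonempty pat, as the structural recursion replAll.
theorem replace_eq_replAll (p : Char) (ps : List Char) (l : List Char) :
    PySem.Chars.replace l (p :: ps) [] = replAll p ps l := by
  have go : ∀ (fuel : Nat) (l acc : List Char), l.length ≤ fuel →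
      PySem.Chars.replace.go (p :: ps) [] fuel l acc = acc.reverse ++ replAll p ps l := by
    intro fuel
    induction fuel with
    | zero =>
      intro l acc h
      have : l = [] := by cases l <;> simp_all
      subst this
      simp [PySem.Chars.replace.go, replAll]
    | succ f ih =>
      intro l acc h
      cases l with
      | nil => simp [PySem.Chars.replace.go, replAll]
      | cons c t =>
        simp only [PySem.Chars.replace.go]
        by_cases hp : (p :: ps).isPrefixOf (c :: t)
        · rw [if_pos hp]
          have hd : List.drop (p :: ps).length (c :: t) = t.drop ps.length := by
            simp [List.drop_succ_cons]
          rw [hd, ih _ _ (by simp at h ⊢; omega)]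
          simp only [replAll, if_pos hp, List.reverse_nil, List.nil_append]
        · rw [if_neg hp, ih _ _ (by simp at h ⊢; omega)]
          simp only [replAll, if_neg hp, List.reverse_cons, List.append_assoc,
            List.singleton_append]
  simp [PySem.Chars.replace, go l.length l [] le_rfl]

-- B's skip-and-tokenize scan equals remove-the-pattern-then-tokenize.
theorem scanTok_eq (p : Char) (ps : List Char) : ∀ (n : Nat) (l cur : List Char),
    l.length ≤ n → tokC (replAll p ps l) cur = scanTok p ps l cur := by
  intro n
  induction n with
  | zero =>
    intro l cur h
    have : l = [] := by cases l <;> simp_all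
    subst this
    simp only [replAll, tokC, scanTok]
  | succ f ih =>
    intro l cur h
    cases l with
    | nil => simp only [replAll, tokC, scanTok]
    | cons c t =>
      by_cases hp : (p :: ps).isPrefixOf (c :: t)
      · rw [show replAll p ps (c :: t) = replAll p ps (t.drop ps.length) from by
            simp only [replAll, if_pos hp],
          show scanTok p ps (c :: t) cur = scanTok p ps (t.drop ps.length) cur from by
            simp only [scanTok, if_pos hp]]
        exact ih _ _ (by simp at h ⊢; omega)
      · rw [show replAll p ps (c :: t) = c :: replAll p ps t from by
            simp only [replAll, if_neg hp]]
        have hlen : t.length ≤ f := by simp at h; omega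
        by_cases hk : keepB c
        · simp only [tokC, scanTok, if_neg hp, if_pos hk]
          exact ih _ _ hlen
        · by_cases hc : cur.isEmpty
          · simp only [tokC, if_neg hk, if_pos hc, scanTok, if_neg hp]
            exact ih _ _ hlen
          · simp only [tokC, if_neg hk, if_neg hc, scanTok, if_neg hp]
            exact congrArg _ (ih _ _ hlen)

-- A's whole address pipeline on the name-stripped line equals joining the direct tokens.
theorem pipe_eq (t2 : String) :
    PySem.Str.strip (PySem.Str.join " "
      ((((PySem.Str.split? (t2.toList.foldl (fun tl word =>
            if badC word then PySem.Str.replace tl (String.ofList [word]) " " else tl) t2) " ").getD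
          []).filter (fun s => PySem.Str.strip s != "")).map PySem.Str.strip))
    = PySem.Str.join " " ((tokC t2.toList []).map String.ofList) := by
  set m := t2.toList.map (fun c => if keepB c then c else ' ') with hm
  have ht3 : (t2.toList.foldl (fun tl word =>
      if badC word then PySem.Str.replace tl (String.ofList [word]) " " else tl) t2).toList = m :=
    fold_toList t2
  have hsplit : PySem.Str.split? (t2.toList.foldl (fun tl word =>
      if badC word then PySem.Str.replace tl (String.ofList [word]) " " else tl) t2) " "
        = some ((splitSp m []).map String.ofList) := by
    simp [PySem.Str.split?, PySem.Chars.split?, ht3, splitOn_sp]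
  rw [hsplit]
  have hfm : (((splitSp m []).map String.ofList).filter
      (fun s => PySem.Str.strip s != "")).map PySem.Str.strip
        = (tokGo m []).map String.ofList := by
    rw [List.filter_map, List.map_map]
    have hflt : (splitSp m []).filter ((fun s => PySem.Str.strip s != "") ∘ String.ofList)
        = (splitSp m []).filter (fun p => !p.isEmpty) := by
      apply List.filter_congr
      intro p hp
      have hst : PySem.Str.strip (String.ofList p) = String.ofList p := by
        apply String.toList_injective
        rw [PySem.Str.toList_strip, String.toList_ofList,
          strip_noop p (piece_nonspace t2.toList p hp)]
      show (PySem.Str.strip (String.ofList p) != "") = !p.isEmpty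
      rw [hst]
      rcases eq_or_ne p [] with hpe | hpe
      · subst hpe; decide
      · have : String.ofList p ≠ "" := by
          intro he
          apply hpe
          have := congrArg String.toList he
          simpa using this
        have h1 : (String.ofList p != "") = true := bne_iff_ne.mpr this
        have h2 : p.isEmpty = false := by simpa [List.isEmpty_iff] using hpe
        rw [h1, h2]
        rfl
    rw [hflt, filter_sp_tok]
    apply List.map_congr_left
    intro p hp
    have hp' : p ∈ splitSp m [] := by
      rw [← filter_sp_tok] at hp
      exact List.mem_of_mem_filter hp
    simp only [Function.comp_apply]
    apply String.toList_injective
    rw [PySem.Str.toList_strip, String.toList_ofList,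
      strip_noop p (piece_nonspace t2.toList p hp')]
  rw [Option.getD_some, hfm]
  have htok : ∀ p ∈ tokGo m [], p ≠ [] ∧ ∀ c ∈ p, PySem.Chars.isspace c = false := by
    intro p hp
    rw [← filter_sp_tok] at hp
    refine ⟨by simpa [List.isEmpty_iff] using (List.of_mem_filter hp), ?_⟩
    exact piece_nonspace t2.toList p (List.mem_of_mem_filter hp)
  have hstrip : PySem.Str.strip (PySem.Str.join " " ((tokGo m []).map String.ofList))
      = PySem.Str.join " " ((tokGo m []).map String.ofList) := by
    apply String.toList_injective
    rw [PySem.Str.toList_strip, PySem.Str.toList_join]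
    have hmap : ((tokGo m []).map String.ofList).map String.toList = tokGo m [] := by
      rw [List.map_map,
        show String.toList ∘ String.ofList = id from funext (fun l => String.toList_ofList),
        List.map_id]
    rw [hmap, show (" " : String).toList = [' '] from rfl]
    rw [strip_join (tokGo m []) htok]
  rw [hstrip, hm, tokGo_map]

-- The two membership tests pick the same lines.
theorem pred_eq (num : String) :
    (fun line => PySem.Str.find line num != -1) = (fun line => PySem.Str.isIn num line) := by
  funext line
  by_cases h : num.toList <:+: line.toList
  · have h1 : PySem.Chars.find line.toList num.toList ≠ -1 :=
      (PySem.Chars.find_ne_neg_one_iff _ _).mpr h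
    have h2 : PySem.Chars.isIn num.toList line.toList = true :=
      (PySem.Chars.isIn_iff_infix _ _).mpr h
    simp [PySem.Str.find, PySem.Str.isIn, bne_iff_ne, h1, h2]
  · have h1 : PySem.Chars.find line.toList num.toList = -1 :=
      (PySem.Chars.find_eq_neg_one_iff _ _).mpr h
    have h2 : PySem.Chars.isIn num.toList line.toList = false :=
      (PySem.Chars.isIn_eq_false_iff _ _).mpr h
    simp [PySem.Str.find, PySem.Str.isIn, h1, h2]

-- The name-removal pattern's character list.
theorem pat_toList (name : String) :
    ("<" ++ name ++ ">" : String).toList = '<' :: (name.toList ++ ['>']) := by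
  simp

-- A's address on the singleton line equals B's scan tokens joined.
theorem addr_eq (t1 name : String) :
    PySem.Str.strip (PySem.Str.join " "
      ((((PySem.Str.split? ((PySem.Str.replace t1 ("<" ++ name ++ ">") "").toList.foldl
            (fun tl word => if badC word then PySem.Str.replace tl (String.ofList [word]) " " else tl)
            (PySem.Str.replace t1 ("<" ++ name ++ ">") "")) " ").getD
          []).filter (fun s => PySem.Str.strip s != "")).map PySem.Str.strip))
    = PySem.Str.join " " ((scanTok '<' (name.toList ++ ['>']) t1.toList []).map String.ofList) := by
  rw [pipe_eq]
  have h2 : (PySem.Str.replace t1 ("<" ++ name ++ ">") "").toList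
      = replAll '<' (name.toList ++ ['>']) t1.toList := by
    rw [PySem.Str.toList_replace, pat_toList]
    exact replace_eq_replAll _ _ _
  rw [h2, scanTok_eq '<' (name.toList ++ ['>']) t1.toList.length t1.toList [] le_rfl]

-- ===== VERDICT (by name: the statement is the Claim_ definition above) =====
theorem phone_spec : Claim_equal_phone := by
  unfold Claim_equal_phone Spec_phone
  intro strng num _
  unfold phone phone_alt
  dsimp only
  rw [pred_eq]
  generalize ((PySem.Str.split? strng "\n").getD []).filter (fun line => PySem.Str.isIn num line) = hits
  rcases hits with _ | ⟨l, _ | ⟨l2, rest2⟩⟩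
  · rw [if_pos (by simp : (([] : List String)).length = 0),
      if_pos (by simp : (([] : List String)).length = 0)]
  · rw [if_neg (by simp : ¬([l].length = 0)),
      if_neg (by simp : ¬([l].length ≥ 2)),
      if_neg (by simp : ¬([l].length = 0)),
      if_neg (by simp : ¬([l].length > 1))]
    exact congrArg _ (addr_eq _ _)
  · rw [if_neg (by simp : ¬((l :: l2 :: rest2).length = 0)),
      if_pos (by simp : (l :: l2 :: rest2).length ≥ 2),
      if_neg (by simp : ¬((l :: l2 :: rest2).length = 0)),
      if_pos (by simp : (l :: l2 :: rest2).length > 1)]
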